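-- pv_equiv track=rewrite | github.com/byungdoh/cdr | cdr/util.py | reg_name
-- ===== SOURCE A (Python) =====
-- def reg_name(string):
--     """
--     Standardize a variable name for regularization
--
--     :param string: ``str``; input string
--     :return: ``str``; transformed string
--     """
--
--     name = string.split(':')[0]
--     name = name.replace('/', '_')
--     cap = True
--     var_name = ''
--     for c in name:
--         if c == '_':
--             cap = True
--         else:
--             if cap:
--                 var_name += c.upper()
--             else:
--                 var_name += c
--             cap = False
--
--     return var_name
-- ===== SOURCE B (Python) =====
-- def reg_name(string):
--     name = string.split(':')[0].replace('/', '_')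
--     return ''.join(w[:1].upper() + w[1:] for w in name.split('_'))
-- ===== Notes on version B (the rewrite author's own statement) =====
-- stated objective: simpler
-- what changed: Replaces the per-character loop with a cap-flag state machine by splitting the name on underscores and joining each word capitalized via w[:1].upper() + w[1:] (also avoids quadratic += string building).
import Mathlib
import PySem

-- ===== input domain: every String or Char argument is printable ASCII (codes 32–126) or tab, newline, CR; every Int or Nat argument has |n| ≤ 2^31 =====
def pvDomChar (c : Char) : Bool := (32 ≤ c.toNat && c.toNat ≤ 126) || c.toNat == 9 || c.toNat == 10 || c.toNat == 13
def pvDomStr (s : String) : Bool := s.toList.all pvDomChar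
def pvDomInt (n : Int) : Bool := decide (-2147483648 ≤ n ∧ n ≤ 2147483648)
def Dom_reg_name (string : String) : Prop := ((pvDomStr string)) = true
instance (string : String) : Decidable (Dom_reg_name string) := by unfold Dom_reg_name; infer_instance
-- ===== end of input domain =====

-- B replaces A's per-character loop with a cap-flag by a split-on-'_' / capitalize-each-word / join decomposition (objective: simpler).

-- ===== PORT A =====
-- string.split(':') is always nonempty, so [0] is its head; c.upper() on one char is upperChar (exact on ASCII)
def reg_name (string : String) : String :=
  let name := ((PySem.Str.split? string ":").getD []).headD ""
  let name := PySem.Str.replace name "/" "_"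
  let r := name.toList.foldl
    (fun (st : Bool × List Char) c =>
      if c = '_' then (true, st.2)
      else (false, st.2 ++ [if st.1 then PySem.Chars.upperChar c else c]))
    (true, [])
  String.ofList r.2

-- ===== PORT B =====
def reg_name_alt (string : String) : String :=
  let name := ((PySem.Str.split? string ":").getD []).headD ""
  let name := PySem.Str.replace name "/" "_"
  let words := (PySem.Str.split? name "_").getD []
  PySem.Str.join "" (words.map (fun w =>
    PySem.Str.upper (PySem.Str.slice w none (some 1)) ++ PySem.Str.slice w (some 1) none))

-- ===== PRECONDITION & SPEC =====
def Spec_reg_name (string : String) (out : String) : Prop := out = reg_name_alt string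
instance (string : String) (out : String) : Decidable (Spec_reg_name string out) := by unfold Spec_reg_name; infer_instance

-- ===== CLAIM (what is proved, stated in full; the proofs are below) =====
def Claim_equal_reg_name : Prop := ∀ (string : String), Dom_reg_name string → Spec_reg_name string (reg_name string)

-- ===== LEMMAS AND PROOFS =====

-- split on a single '_' as a structural recursion
def pvPrep (p : List Char) : List (List Char) → List (List Char)
  | [] => [p]
  | w :: ws => (p ++ w) :: ws

def pvSplit1 : List Char → List (List Char)
  | [] => [[]]
  | c :: rest => if c = '_' then [] :: pvSplit1 rest else pvPrep [c] (pvSplit1 rest)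

-- A's loop as a structural recursion
def pvSpecA (cap : Bool) : List Char → List Char
  | [] => []
  | c :: rest =>
      if c = '_' then pvSpecA true rest
      else (if cap then PySem.Chars.upperChar c else c) :: pvSpecA false rest

-- B's per-word capitalization, on char lists
def pvCapW (w : List Char) : List Char := PySem.Chars.upper (w.take 1) ++ w.drop 1

def pvHeadPlus : List (List Char) → List Char
  | [] => []
  | w :: ws => w ++ PySem.Chars.join [] (ws.map pvCapW)

theorem pvSplit1_ne_nil (cs : List Char) : pvSplit1 cs ≠ [] := by
  cases cs with
  | nil => simp [pvSplit1]
  | cons c rest =>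
      simp only [pvSplit1]
      split
      · simp
      · cases h : pvSplit1 rest <;> simp [pvPrep]

theorem pvPrep_append (a b : List Char) (ws : List (List Char)) :
    pvPrep (a ++ b) ws = pvPrep a (pvPrep b ws) := by
  cases ws <;> simp [pvPrep]

theorem pvGo_eq (fuel : Nat) (l cur : List Char) (acc : List (List Char))
    (h : l.length ≤ fuel) :
    PySem.Chars.splitOn.go ['_'] fuel l cur acc = acc.reverse ++ pvPrep cur.reverse (pvSplit1 l) := by
  induction fuel generalizing l cur acc with
  | zero =>
      have : l = [] := by cases l <;> simp_all
      subst this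
      simp [PySem.Chars.splitOn.go, pvSplit1, pvPrep]
  | succ fuel ih =>
      cases l with
      | nil => simp [PySem.Chars.splitOn.go, pvSplit1, pvPrep]
      | cons c rest =>
          rw [PySem.Chars.splitOn.go]
          by_cases hc : c = '_'
          · subst hc
            simp only [List.isPrefixOf, Bool.and_true, beq_self_eq_true, if_pos,
              List.length_cons, List.length_nil, List.drop_succ_cons, List.drop_zero]
            rw [ih rest [] (cur.reverse :: acc) (by simpa using Nat.le_of_succ_le_succ h)]
            have hne := pvSplit1_ne_nil rest
            cases hs : pvSplit1 rest with
            | nil => exact absurd hs hne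
            | cons w ws =>
                simp [pvSplit1, hs, pvPrep]
          · have hb : (['_'].isPrefixOf (c :: rest)) = false := by
              simp [List.isPrefixOf]
              exact fun hh => (hc hh.symm).elim
            simp only [hb, Bool.false_eq_true, if_false]
            rw [ih rest (c :: cur) acc (by simpa using Nat.le_of_succ_le_succ h)]
            have : (c :: cur).reverse = cur.reverse ++ [c] := by simp
            rw [this, pvPrep_append]
            simp [pvSplit1, hc]

theorem pvSplitOn_eq (cs : List Char) : PySem.Chars.splitOn cs ['_'] = pvSplit1 cs := by
  unfold PySem.Chars.splitOn
  rw [pvGo_eq _ _ _ _ (Nat.le_succ_of_le (Nat.le_refl _))]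
  have hne := pvSplit1_ne_nil cs
  cases hs : pvSplit1 cs with
  | nil => exact absurd hs hne
  | cons w ws => simp [pvPrep]

theorem pvJoin_nil_cons (x : List Char) (xs : List (List Char)) :
    PySem.Chars.join [] (x :: xs) = x ++ PySem.Chars.join [] xs := by
  cases xs <;> simp [PySem.Chars.join, List.intercalate]

theorem pvMain (cs : List Char) :
    PySem.Chars.join [] ((pvSplit1 cs).map pvCapW) = pvSpecA true cs ∧
    pvHeadPlus (pvSplit1 cs) = pvSpecA false cs := by
  induction cs with
  | nil => simp [pvSplit1, pvSpecA, pvHeadPlus, pvCapW, PySem.Chars.join, PySem.Chars.upper, List.intercalate]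
  | cons c rest ih =>
      by_cases hc : c = '_'
      · subst hc
        constructor
        · rw [show pvSplit1 ('_' :: rest) = [] :: pvSplit1 rest from by simp [pvSplit1],
            List.map_cons, pvJoin_nil_cons]
          simpa [pvCapW, PySem.Chars.upper, pvSpecA] using ih.1
        · rw [show pvSplit1 ('_' :: rest) = [] :: pvSplit1 rest from by simp [pvSplit1]]
          simpa [pvHeadPlus, pvSpecA] using ih.1
      · have hne := pvSplit1_ne_nil rest
        cases hs : pvSplit1 rest with
        | nil => exact absurd hs hne
        | cons w ws =>
            have hsplit : pvSplit1 (c :: rest) = (c :: w) :: ws := by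
              simp [pvSplit1, hc, hs, pvPrep]
            constructor
            · rw [hsplit, List.map_cons, pvJoin_nil_cons]
              have hcap : pvCapW (c :: w) = PySem.Chars.upperChar c :: w := by
                simp [pvCapW, PySem.Chars.upper]
              rw [hcap]
              have hT : w ++ PySem.Chars.join [] (ws.map pvCapW) = pvSpecA false rest := by
                have := ih.2; rwa [hs] at this
              simp [pvSpecA, hc, hT]
            · rw [hsplit]
              have hT : w ++ PySem.Chars.join [] (ws.map pvCapW) = pvSpecA false rest := by
                have := ih.2; rwa [hs] at this
              simp [pvHeadPlus, pvSpecA, hc, hT]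

theorem pvFoldA (cs : List Char) (cap : Bool) (acc : List Char) :
    (cs.foldl
      (fun (st : Bool × List Char) c =>
        if c = '_' then (true, st.2)
        else (false, st.2 ++ [if st.1 then PySem.Chars.upperChar c else c]))
      (cap, acc)).2 = acc ++ pvSpecA cap cs := by
  induction cs generalizing cap acc with
  | nil => simp [pvSpecA]
  | cons c rest ih =>
      by_cases hc : c = '_'
      · subst hc; simp [pvSpecA, ih]
      · simp [pvSpecA, hc, ih]

-- ===== VERDICT (by name: the statement is the Claim_ definition above) =====
theorem reg_name_spec : Claim_equal_reg_name := by
  intro s _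
  unfold Spec_reg_name reg_name reg_name_alt
  apply String.toList_inj.mp
  simp only []
  set name := PySem.Str.replace (((PySem.Str.split? s ":").getD []).headD "") "/" "_" with hname
  -- B's words: split? name "_" is some, with chars splitOn
  have hsplit : Option.map (fun x => List.map String.toList x) (PySem.Str.split? name "_") =
      PySem.Chars.split? name.toList "_".toList := PySem.Str.split?_map name "_"
  have hchars : PySem.Chars.split? name.toList "_".toList = some (pvSplit1 name.toList) := by
    rw [show ("_".toList) = ['_'] from rfl]
    simp [PySem.Chars.split?, pvSplitOn_eq]
  rw [hchars] at hsplit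
  cases hw : PySem.Str.split? name "_" with
  | none => rw [hw] at hsplit; simp at hsplit
  | some ws =>
      rw [hw] at hsplit
      have hws : ws.map String.toList = pvSplit1 name.toList := by simpa using hsplit
      -- LHS
      rw [show (String.ofList ((name.toList.foldl
        (fun (st : Bool × List Char) c =>
          if c = '_' then (true, st.2)
          else (false, st.2 ++ [if st.1 then PySem.Chars.upperChar c else c]))
        (true, [])).2)).toList = pvSpecA true name.toList from by
          rw [String.toList_ofList, pvFoldA]; simp]
      -- RHS
      simp only [Option.getD_some, PySem.Str.toList_join, List.map_map]
      have hmap : (ws.map (String.toList ∘ fun w =>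
          PySem.Str.upper (PySem.Str.slice w none (some 1)) ++ PySem.Str.slice w (some 1) none)) =
          (ws.map String.toList).map pvCapW := by
        rw [List.map_map]
        apply List.map_congr_left
        intro w _
        simp [Function.comp, PySem.Str.toList_upper, PySem.Str.toList_slice,
          PySem.Chars.slice_eq_listSlice, PySem.List.slice_to w.toList (by norm_num : (0:Int) ≤ 1),
          PySem.List.slice_from w.toList (by norm_num : (0:Int) ≤ 1), pvCapW]
      rw [hmap, hws, show ("".toList) = ([] : List Char) from rfl, (pvMain name.toList).1]
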